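-- pv_equiv track=rewrite | github.com/Aashik1701/Xai-model-for-personalized-treatment-recommendation | scripts/simple_explainer.py | _generate_clinical_insights
-- ===== SOURCE A (Python) =====
-- def _generate_clinical_insights(top_features):
--     """Generate clinical insights from top features."""
--     insights = []
--
--     if not top_features:
--         return insights
--
--     # Feature categories
--     categories = {
--         "modifiable": ["smoking", "exercise", "stress_level", "bmi"],
--         "medical": ["blood_pressure", "cholesterol", "glucose", "heart_rate"],
--         "demographic": ["age"],
--         "genetic": ["family_history"],
--     }
--
--     # Categorize top features
--     top_feature_names = [f[0] for f in top_features[:3]]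
--
--     for category, features in categories.items():
--         category_features = [f for f in top_feature_names if f in features]
--         if category_features:
--             if category == "modifiable":
--                 insights.append(
--                     f"Modifiable risk factors identified: {', '.join(category_features)}. "
--                     "Patient education and lifestyle interventions may be effective."
--                 )
--             elif category == "medical":
--                 insights.append(
--                     f"Medical monitoring needed for: {', '.join(category_features)}. "
--                     "Consider regular clinical assessment."
--                 )
--             elif category == "demographic":
--                 insights.append(
--                     "Age is a significant factor. Consider age-appropriate screening protocols."
--                 )
--             elif category == "genetic":
--                 insights.append(
--                     "Family history is influential. Genetic counseling may be beneficial."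
--                 )
--
--     return insights
-- ===== SOURCE B (Python) =====
-- _CATEGORY_OF = {
--     "smoking": "modifiable", "exercise": "modifiable",
--     "stress_level": "modifiable", "bmi": "modifiable",
--     "blood_pressure": "medical", "cholesterol": "medical",
--     "glucose": "medical", "heart_rate": "medical",
--     "age": "demographic", "family_history": "genetic",
-- }
--
--
-- def _generate_clinical_insights(top_features):
--     """Generate clinical insights from top features (single bucketing pass)."""
--     modifiable, medical, demographic, genetic = [], [], [], []
--     for name, _ in top_features[:3]:
--         cat = _CATEGORY_OF.get(name)
--         if cat == "modifiable":
--             modifiable.append(name)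
--         elif cat == "medical":
--             medical.append(name)
--         elif cat == "demographic":
--             demographic.append(name)
--         elif cat == "genetic":
--             genetic.append(name)
--
--     insights = []
--     if modifiable:
--         insights.append(
--             "Modifiable risk factors identified: " + ", ".join(modifiable)
--             + ". Patient education and lifestyle interventions may be effective."
--         )
--     if medical:
--         insights.append(
--             "Medical monitoring needed for: " + ", ".join(medical)
--             + ". Consider regular clinical assessment."
--         )
--     if demographic:
--         insights.append(
--             "Age is a significant factor. Consider age-appropriate screening protocols."
--         )
--     if genetic:
--         insights.append(
--             "Family history is influential. Genetic counseling may be beneficial."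
--         )
--     return insights
-- ===== Notes on version B (the rewrite author's own statement) =====
-- stated objective: alternative
-- what changed: Replaces A's four per-category membership scans over the top feature names by a single bucketing pass through a precomputed reverse feature-to-category index, then emits the insight strings from the four buckets in the fixed category order.
import Mathlib
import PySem

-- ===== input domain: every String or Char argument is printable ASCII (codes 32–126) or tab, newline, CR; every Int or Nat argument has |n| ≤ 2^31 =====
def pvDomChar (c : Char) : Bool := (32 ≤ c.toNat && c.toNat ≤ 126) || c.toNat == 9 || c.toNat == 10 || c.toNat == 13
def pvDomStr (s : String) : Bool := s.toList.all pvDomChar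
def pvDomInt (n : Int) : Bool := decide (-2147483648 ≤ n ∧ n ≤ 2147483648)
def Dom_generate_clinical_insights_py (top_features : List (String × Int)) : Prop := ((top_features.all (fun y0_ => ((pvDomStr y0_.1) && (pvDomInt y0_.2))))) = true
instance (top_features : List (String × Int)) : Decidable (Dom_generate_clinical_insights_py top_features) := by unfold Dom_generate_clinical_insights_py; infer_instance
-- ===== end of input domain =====

-- B replaces A's four per-category membership scans by one bucketing pass over
-- the first three feature names through a reverse feature→category index (objective: alternative decomposition).

-- ===== PORT A =====
-- shared message builders (the literal strings of the Python source, used by both ports)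
def pvMsgMod (cf : List String) : String :=
  "Modifiable risk factors identified: " ++ PySem.Str.join ", " cf ++
    ". Patient education and lifestyle interventions may be effective."
def pvMsgMed (cf : List String) : String :=
  "Medical monitoring needed for: " ++ PySem.Str.join ", " cf ++
    ". Consider regular clinical assessment."
def pvMsgDemo : String := "Age is a significant factor. Consider age-appropriate screening protocols."
def pvMsgGen : String := "Family history is influential. Genetic counseling may be beneficial."

-- A's `categories` dict, iterated in insertion order
def pvCategories : List (String × List String) :=
  [("modifiable", ["smoking", "exercise", "stress_level", "bmi"]),
   ("medical", ["blood_pressure", "cholesterol", "glucose", "heart_rate"]),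
   ("demographic", ["age"]),
   ("genetic", ["family_history"])]

def generate_clinical_insights_py (top_features : List (String × Int)) : List String :=
  if top_features = [] then []
  else
    let top_feature_names := (PySem.List.slice top_features none (some 3)).map (fun f => f.1)
    pvCategories.foldl (fun insights cat =>
      let category_features := top_feature_names.filter (fun f => cat.2.contains f)
      if category_features ≠ [] then
        if cat.1 = "modifiable" then insights ++ [pvMsgMod category_features]
        else if cat.1 = "medical" then insights ++ [pvMsgMed category_features]
        else if cat.1 = "demographic" then insights ++ [pvMsgDemo]
        else if cat.1 = "genetic" then insights ++ [pvMsgGen]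
        else insights
      else insights) []

-- ===== PORT B =====
-- B's reverse index _CATEGORY_OF
def pvCategoryOf : PySem.Dict String String :=
  PySem.Dict.ofList
    [("smoking", "modifiable"), ("exercise", "modifiable"),
     ("stress_level", "modifiable"), ("bmi", "modifiable"),
     ("blood_pressure", "medical"), ("cholesterol", "medical"),
     ("glucose", "medical"), ("heart_rate", "medical"),
     ("age", "demographic"), ("family_history", "genetic")]

-- loop body of B's single bucketing pass (state: the four buckets)
def pvBucketStep (b : List String × List String × List String × List String)
    (p : String × Int) : List String × List String × List String × List String :=
  match PySem.Dict.get? pvCategoryOf p.1 with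
  | some c =>
    if c = "modifiable" then (b.1 ++ [p.1], b.2.1, b.2.2.1, b.2.2.2)
    else if c = "medical" then (b.1, b.2.1 ++ [p.1], b.2.2.1, b.2.2.2)
    else if c = "demographic" then (b.1, b.2.1, b.2.2.1 ++ [p.1], b.2.2.2)
    else if c = "genetic" then (b.1, b.2.1, b.2.2.1, b.2.2.2 ++ [p.1])
    else b
  | none => b

def generate_clinical_insights_py_alt (top_features : List (String × Int)) : List String :=
  let b := (PySem.List.slice top_features none (some 3)).foldl pvBucketStep ([], [], [], [])
  (if b.1 ≠ [] then [pvMsgMod b.1] else []) ++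
  (if b.2.1 ≠ [] then [pvMsgMed b.2.1] else []) ++
  (if b.2.2.1 ≠ [] then [pvMsgDemo] else []) ++
  (if b.2.2.2 ≠ [] then [pvMsgGen] else [])

-- ===== PRECONDITION & SPEC =====
def Spec_generate_clinical_insights_py (top_features : List (String × Int)) (out : List String) : Prop := out = generate_clinical_insights_py_alt top_features
instance (top_features : List (String × Int)) (out : List String) : Decidable (Spec_generate_clinical_insights_py top_features out) := by unfold Spec_generate_clinical_insights_py; infer_instance

-- ===== CLAIM (what is proved, stated in full; the proofs are below) =====
def Claim_equal_generate_clinical_insights_py : Prop := ∀ (top_features : List (String × Int)), Dom_generate_clinical_insights_py top_features → Spec_generate_clinical_insights_py top_features (generate_clinical_insights_py top_features)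

-- ===== LEMMAS AND PROOFS =====

-- the reverse index returns none outside the ten known feature names
lemma get?_pvCategoryOf_none (s : String)
    (h1 : s ≠ "smoking") (h2 : s ≠ "exercise") (h3 : s ≠ "stress_level") (h4 : s ≠ "bmi")
    (h5 : s ≠ "blood_pressure") (h6 : s ≠ "cholesterol") (h7 : s ≠ "glucose")
    (h8 : s ≠ "heart_rate") (h9 : s ≠ "age") (h10 : s ≠ "family_history") :
    PySem.Dict.get? pvCategoryOf s = none := by
  have hm : pvCategoryOf = PySem.Dict.mk
      [("smoking", "modifiable"), ("exercise", "modifiable"),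
       ("stress_level", "modifiable"), ("bmi", "modifiable"),
       ("blood_pressure", "medical"), ("cholesterol", "medical"),
       ("glucose", "medical"), ("heart_rate", "medical"),
       ("age", "demographic"), ("family_history", "genetic")] := by decide
  rw [hm]
  simp only [PySem.Dict.get?_mk_cons, beq_iff_eq]
  rw [if_neg (Ne.symm h1), if_neg (Ne.symm h2), if_neg (Ne.symm h3), if_neg (Ne.symm h4),
    if_neg (Ne.symm h5), if_neg (Ne.symm h6), if_neg (Ne.symm h7), if_neg (Ne.symm h8),
    if_neg (Ne.symm h9), if_neg (Ne.symm h10)]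
  simp [PySem.Dict.get?]

-- one bucketing step, rewritten through the four membership tests
lemma pvBucketStep_eq (b : List String × List String × List String × List String)
    (p : String × Int) :
    pvBucketStep b p =
      (b.1 ++ if (["smoking", "exercise", "stress_level", "bmi"] : List String).contains p.1 then [p.1] else [],
       b.2.1 ++ if (["blood_pressure", "cholesterol", "glucose", "heart_rate"] : List String).contains p.1 then [p.1] else [],
       b.2.2.1 ++ if (["age"] : List String).contains p.1 then [p.1] else [],
       b.2.2.2 ++ if (["family_history"] : List String).contains p.1 then [p.1] else []) := by
  rcases p with ⟨s, n⟩
  by_cases h : s ∈ (["smoking", "exercise", "stress_level", "bmi", "blood_pressure",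
      "cholesterol", "glucose", "heart_rate", "age", "family_history"] : List String)
  · simp only [List.mem_cons, List.not_mem_nil, or_false] at h
    rcases h with rfl | rfl | rfl | rfl | rfl | rfl | rfl | rfl | rfl | rfl
    · simp only [pvBucketStep]
      rw [show PySem.Dict.get? pvCategoryOf "smoking" = some "modifiable" from by decide]
      simp
    · simp only [pvBucketStep]
      rw [show PySem.Dict.get? pvCategoryOf "exercise" = some "modifiable" from by decide]
      simp
    · simp only [pvBucketStep]
      rw [show PySem.Dict.get? pvCategoryOf "stress_level" = some "modifiable" from by decide]
      simp
    · simp only [pvBucketStep]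
      rw [show PySem.Dict.get? pvCategoryOf "bmi" = some "modifiable" from by decide]
      simp
    · simp only [pvBucketStep]
      rw [show PySem.Dict.get? pvCategoryOf "blood_pressure" = some "medical" from by decide]
      simp
    · simp only [pvBucketStep]
      rw [show PySem.Dict.get? pvCategoryOf "cholesterol" = some "medical" from by decide]
      simp
    · simp only [pvBucketStep]
      rw [show PySem.Dict.get? pvCategoryOf "glucose" = some "medical" from by decide]
      simp
    · simp only [pvBucketStep]
      rw [show PySem.Dict.get? pvCategoryOf "heart_rate" = some "medical" from by decide]
      simp
    · simp only [pvBucketStep]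
      rw [show PySem.Dict.get? pvCategoryOf "age" = some "demographic" from by decide]
      simp
    · simp only [pvBucketStep]
      rw [show PySem.Dict.get? pvCategoryOf "family_history" = some "genetic" from by decide]
      simp
  · simp only [List.mem_cons, List.not_mem_nil, or_false, not_or] at h
    obtain ⟨h1, h2, h3, h4, h5, h6, h7, h8, h9, h10⟩ := h
    simp only [pvBucketStep]
    rw [get?_pvCategoryOf_none s h1 h2 h3 h4 h5 h6 h7 h8 h9 h10]
    simp [h1, h2, h3, h4, h5, h6, h7, h8, h9, h10]

-- the single pass fills each bucket with exactly A's per-category filter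
lemma bucket_fold (ps : List (String × Int))
    (m e d g : List String) :
    ps.foldl pvBucketStep (m, e, d, g) =
      (m ++ (ps.map (fun f => f.1)).filter (fun f => (["smoking", "exercise", "stress_level", "bmi"] : List String).contains f),
       e ++ (ps.map (fun f => f.1)).filter (fun f => (["blood_pressure", "cholesterol", "glucose", "heart_rate"] : List String).contains f),
       d ++ (ps.map (fun f => f.1)).filter (fun f => (["age"] : List String).contains f),
       g ++ (ps.map (fun f => f.1)).filter (fun f => (["family_history"] : List String).contains f)) := by
  induction ps generalizing m e d g with
  | nil => simp
  | cons p ps ih =>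
    simp only [List.foldl_cons, pvBucketStep_eq, ih, List.map_cons, List.filter_cons]
    rcases p with ⟨s, n⟩
    by_cases h1 : (["smoking", "exercise", "stress_level", "bmi"] : List String).contains s <;>
      by_cases h2 : (["blood_pressure", "cholesterol", "glucose", "heart_rate"] : List String).contains s <;>
        by_cases h3 : (["age"] : List String).contains s <;>
          by_cases h4 : (["family_history"] : List String).contains s <;>
            simp_all

-- ===== VERDICT (by name: the statement is the Claim_ definition above) =====
theorem generate_clinical_insights_py_spec : Claim_equal_generate_clinical_insights_py := by
  intro top_features _
  show generate_clinical_insights_py top_features = generate_clinical_insights_py_alt top_features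
  unfold generate_clinical_insights_py generate_clinical_insights_py_alt
  rw [bucket_fold]
  by_cases hnil : top_features = []
  · subst hnil; decide
  · simp only [if_neg hnil, pvCategories, List.foldl_cons, List.foldl_nil]
    generalize (List.filter (fun f => (["smoking", "exercise", "stress_level", "bmi"] : List String).contains f) (List.map (fun f => f.1) (PySem.List.slice top_features none (some 3)))) = F1
    generalize (List.filter (fun f => (["blood_pressure", "cholesterol", "glucose", "heart_rate"] : List String).contains f) (List.map (fun f => f.1) (PySem.List.slice top_features none (some 3)))) = F2
    generalize (List.filter (fun f => (["age"] : List String).contains f) (List.map (fun f => f.1) (PySem.List.slice top_features none (some 3)))) = F3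
    generalize (List.filter (fun f => (["family_history"] : List String).contains f) (List.map (fun f => f.1) (PySem.List.slice top_features none (some 3)))) = F4
    simp only [String.reduceEq, if_true, if_false]
    split_ifs <;> simp_all
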